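-- pv_equiv track=rewrite | github.com/nicklasorte/spectrum-systems | spectrum_systems/modules/runtime/run_bundle.py | classify_bundle_failure
-- ===== SOURCE A (Python) =====
-- from typing import Any, Dict, List, Optional
--
-- _FAILURE_TYPE_PRIORITY: Dict[str, int] = {
--     "manifest_invalid": 0,
--     "missing_required_input": 1,
--     "output_contract_invalid": 2,
--     "provenance_incomplete": 3,
--     "idempotency_undefined": 4,
-- }
--
-- def classify_bundle_failure(triggering_conditions: List[str]) -> Optional[str]:
--     """Return the most severe failure type in *triggering_conditions*."""
--     found: Optional[str] = None
--     found_priority = 999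
--     for condition in triggering_conditions:
--         for failure_type, priority in _FAILURE_TYPE_PRIORITY.items():
--             if condition.startswith(failure_type):
--                 if priority < found_priority:
--                     found = failure_type
--                     found_priority = priority
--     return found
-- ===== SOURCE B (Python) =====
-- from typing import List, Optional
--
-- _FAILURE_TYPES: List[str] = [
--     "manifest_invalid",
--     "missing_required_input",
--     "output_contract_invalid",
--     "provenance_incomplete",
--     "idempotency_undefined",
-- ]
--
-- def classify_bundle_failure(triggering_conditions: List[str]) -> Optional[str]:
--     """Return the most severe failure type in *triggering_conditions*."""
--     for failure_type in _FAILURE_TYPES: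
--         if any(c.startswith(failure_type) for c in triggering_conditions):
--             return failure_type
--     return None
-- ===== Notes on version B (the rewrite author's own statement) =====
-- stated objective: simpler
-- what changed: Instead of scanning every condition against every failure type while tracking a running minimum priority, B iterates the failure types once in fixed severity order and returns the first one some condition starts with (early exit), dropping the priority bookkeeping entirely.
import Mathlib
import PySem

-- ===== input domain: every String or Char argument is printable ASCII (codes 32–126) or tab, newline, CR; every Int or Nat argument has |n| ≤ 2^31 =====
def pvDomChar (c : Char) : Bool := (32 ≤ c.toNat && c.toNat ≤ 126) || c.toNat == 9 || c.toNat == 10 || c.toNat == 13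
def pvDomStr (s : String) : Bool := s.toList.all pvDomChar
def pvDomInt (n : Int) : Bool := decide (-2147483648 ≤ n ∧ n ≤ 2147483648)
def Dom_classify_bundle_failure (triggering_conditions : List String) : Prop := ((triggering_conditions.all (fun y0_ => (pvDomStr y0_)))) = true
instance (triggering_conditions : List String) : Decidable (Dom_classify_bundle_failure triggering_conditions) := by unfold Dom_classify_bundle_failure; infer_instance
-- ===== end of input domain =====

-- B iterates the failure types in fixed severity order and returns the first one any condition
-- starts with, instead of A's full scan with a running minimum priority; objective: simpler.


-- ===== PORT A =====
-- the module constant _FAILURE_TYPE_PRIORITY (dict, insertion order)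
def pvFTP : List (String × Int) :=
  [("manifest_invalid", 0), ("missing_required_input", 1), ("output_contract_invalid", 2),
   ("provenance_incomplete", 3), ("idempotency_undefined", 4)]

-- body of A's outer loop: the inner loop over the dict items, updating (found, found_priority)
def pvAStep (st : Option String × Int) (condition : String) : Option String × Int :=
  pvFTP.foldl (fun st p =>
    if PySem.Str.startswith condition p.1 then
      (if p.2 < st.2 then (some p.1, p.2) else st)
    else st) st

def classify_bundle_failure (triggering_conditions : List String) : Option String :=
  (triggering_conditions.foldl pvAStep ((none : Option String), (999 : Int))).1

-- ===== PORT B =====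
-- the module constant _FAILURE_TYPES (most to least severe)
def pvFTs : List String :=
  ["manifest_invalid", "missing_required_input", "output_contract_invalid",
   "provenance_incomplete", "idempotency_undefined"]

def classify_bundle_failure_alt (triggering_conditions : List String) : Option String :=
  pvFTs.find? (fun ft => triggering_conditions.any (fun c => PySem.Str.startswith c ft))

-- ===== PRECONDITION & SPEC =====
def Spec_classify_bundle_failure (triggering_conditions : List String) (out : Option String) : Prop := out = classify_bundle_failure_alt triggering_conditions
instance (triggering_conditions : List String) (out : Option String) : Decidable (Spec_classify_bundle_failure triggering_conditions out) := by unfold Spec_classify_bundle_failure; infer_instance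

-- ===== CLAIM (what is proved, stated in full; the proofs are below) =====
def Claim_equal_classify_bundle_failure : Prop := ∀ (triggering_conditions : List String), Dom_classify_bundle_failure triggering_conditions → Spec_classify_bundle_failure triggering_conditions (classify_bundle_failure triggering_conditions)

-- ===== LEMMAS AND PROOFS =====

-- index of the first failure type the condition starts with (5 = none)
def pvM (c : String) : Nat :=
  if PySem.Str.startswith c "manifest_invalid" then 0
  else if PySem.Str.startswith c "missing_required_input" then 1
  else if PySem.Str.startswith c "output_contract_invalid" then 2
  else if PySem.Str.startswith c "provenance_incomplete" then 3
  else if PySem.Str.startswith c "idempotency_undefined" then 4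
  else 5

-- abstract state of A's fold: best index so far (5.. = nothing found yet)
def pvSt : Nat → Option String × Int
  | 0 => (some "manifest_invalid", 0)
  | 1 => (some "missing_required_input", 1)
  | 2 => (some "output_contract_invalid", 2)
  | 3 => (some "provenance_incomplete", 3)
  | 4 => (some "idempotency_undefined", 4)
  | _ => (none, 999)

lemma pvStep_eq (j : Nat) (c : String) : pvAStep (pvSt j) c = pvSt (min j (pvM c)) := by
  simp only [pvAStep, pvFTP, List.foldl, pvM]
  by_cases h0 : PySem.Str.startswith c "manifest_invalid" <;>
  by_cases h1 : PySem.Str.startswith c "missing_required_input" <;>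
  by_cases h2 : PySem.Str.startswith c "output_contract_invalid" <;>
  by_cases h3 : PySem.Str.startswith c "provenance_incomplete" <;>
  by_cases h4 : PySem.Str.startswith c "idempotency_undefined" <;>
  simp only [h0, h1, h2, h3, h4, if_true] <;>
  rcases j with _ | _ | _ | _ | _ | j <;>
  simp [pvSt]

lemma pvFold_eq (conds : List String) (j : Nat) :
    conds.foldl pvAStep (pvSt j) = pvSt (conds.foldl (fun j c => min j (pvM c)) j) := by
  induction conds generalizing j with
  | nil => rfl
  | cons c rest ih => simp only [List.foldl, pvStep_eq, ih]

lemma pvFoldMin_le (conds : List String) (j : Nat) :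
    conds.foldl (fun j c => min j (pvM c)) j ≤ j := by
  induction conds generalizing j with
  | nil => exact le_refl _
  | cons c rest ih => exact le_trans (ih _) (Nat.min_le_left _ _)

lemma pvFoldMin_lb (conds : List String) :
    ∀ (j : Nat) (c : String), c ∈ conds → conds.foldl (fun j c => min j (pvM c)) j ≤ pvM c := by
  induction conds with
  | nil => intro _ _ hc; cases hc
  | cons d rest ih =>
    intro j c hc
    rw [List.foldl]
    rcases List.mem_cons.mp hc with h | h
    · subst h; exact le_trans (pvFoldMin_le rest _) (Nat.min_le_right _ _)
    · exact ih _ _ h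

lemma pvFoldMin_attained (conds : List String) (j : Nat) :
    conds.foldl (fun j c => min j (pvM c)) j = j ∨
      ∃ c ∈ conds, pvM c = conds.foldl (fun j c => min j (pvM c)) j := by
  induction conds generalizing j with
  | nil => exact Or.inl rfl
  | cons d rest ih =>
    rcases ih (min j (pvM d)) with h | ⟨c, hc, hm⟩
    · rw [List.foldl, h]
      rcases Nat.le_total j (pvM d) with hle | hle
      · exact Or.inl (Nat.min_eq_left hle)
      · exact Or.inr ⟨d, List.mem_cons_self, (Nat.min_eq_right hle).symm⟩
    · exact Or.inr ⟨c, List.mem_cons_of_mem _ hc, hm⟩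

-- if c starts with the i-th failure type then its first-match index is ≤ i
lemma pvM_le_of_sw (c ft : String) (i : Nat) (hi : pvFTs[i]? = some ft)
    (h : PySem.Str.startswith c ft = true) : pvM c ≤ i := by
  rcases i with _ | _ | _ | _ | _ | i <;>
    simp_all [pvFTs, pvM] <;> split_ifs <;> simp_all

lemma pvSw_of_M (c : String) (h : pvM c < 5) :
    ∃ ft, pvFTs[pvM c]? = some ft ∧ PySem.Str.startswith c ft = true := by
  unfold pvM at *
  split_ifs at * <;> simp_all [pvFTs]

lemma pvMain (conds : List String) :
    (pvSt (conds.foldl (fun j c => min j (pvM c)) 5)).1 = classify_bundle_failure_alt conds := by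
  set M := conds.foldl (fun j c => min j (pvM c)) 5 with hM
  have hlb : ∀ c ∈ conds, M ≤ pvM c := fun c hc => pvFoldMin_lb conds 5 c hc
  have hnone : ∀ i < M, ∀ ft, pvFTs[i]? = some ft →
      conds.any (fun c => PySem.Str.startswith c ft) = false := by
    intro i hi ft hft
    rw [List.any_eq_false]
    intro c hc
    simp only [Bool.not_eq_true]
    by_contra h
    rw [Bool.not_eq_false] at h
    exact absurd (le_trans (hlb c hc) (pvM_le_of_sw c ft i hft h)) (Nat.not_le.mpr hi)
  have hle5 : M ≤ 5 := pvFoldMin_le conds 5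
  rcases Nat.lt_or_ge M 5 with h5 | h5
  · -- M < 5 : attained, so the M-th failure type is matched and earlier ones are not
    rcases pvFoldMin_attained conds 5 with h | ⟨c, hc, hm⟩
    · omega
    · rw [← hM] at hm
      obtain ⟨ft, hft, hsw⟩ := pvSw_of_M c (by rw [hm]; exact h5)
      have htrue : conds.any (fun x => PySem.Str.startswith x ft) = true :=
        List.any_eq_true.mpr ⟨c, hc, hsw⟩
      rw [hm] at hft
      interval_cases M
      · simp [pvFTs] at hft
        subst hft
        simp only [classify_bundle_failure_alt, pvFTs, pvSt]
        rw [List.find?_cons_of_pos (p := fun ft => conds.any fun c => PySem.Str.startswith c ft) htrue]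
      · have e0 := hnone 0 (by omega) "manifest_invalid" rfl
        simp [pvFTs] at hft
        subst hft
        simp only [classify_bundle_failure_alt, pvFTs, pvSt]
        rw [List.find?_cons_of_neg (p := fun ft => conds.any fun c => PySem.Str.startswith c ft) (ne_true_of_eq_false e0), List.find?_cons_of_pos (p := fun ft => conds.any fun c => PySem.Str.startswith c ft) htrue]
      · have e0 := hnone 0 (by omega) "manifest_invalid" rfl
        have e1 := hnone 1 (by omega) "missing_required_input" rfl
        simp [pvFTs] at hft
        subst hft
        simp only [classify_bundle_failure_alt, pvFTs, pvSt]
        rw [List.find?_cons_of_neg (p := fun ft => conds.any fun c => PySem.Str.startswith c ft) (ne_true_of_eq_false e0), List.find?_cons_of_neg (p := fun ft => conds.any fun c => PySem.Str.startswith c ft) (ne_true_of_eq_false e1),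
          List.find?_cons_of_pos (p := fun ft => conds.any fun c => PySem.Str.startswith c ft) htrue]
      · have e0 := hnone 0 (by omega) "manifest_invalid" rfl
        have e1 := hnone 1 (by omega) "missing_required_input" rfl
        have e2 := hnone 2 (by omega) "output_contract_invalid" rfl
        simp [pvFTs] at hft
        subst hft
        simp only [classify_bundle_failure_alt, pvFTs, pvSt]
        rw [List.find?_cons_of_neg (p := fun ft => conds.any fun c => PySem.Str.startswith c ft) (ne_true_of_eq_false e0), List.find?_cons_of_neg (p := fun ft => conds.any fun c => PySem.Str.startswith c ft) (ne_true_of_eq_false e1),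
          List.find?_cons_of_neg (p := fun ft => conds.any fun c => PySem.Str.startswith c ft) (ne_true_of_eq_false e2), List.find?_cons_of_pos (p := fun ft => conds.any fun c => PySem.Str.startswith c ft) htrue]
      · have e0 := hnone 0 (by omega) "manifest_invalid" rfl
        have e1 := hnone 1 (by omega) "missing_required_input" rfl
        have e2 := hnone 2 (by omega) "output_contract_invalid" rfl
        have e3 := hnone 3 (by omega) "provenance_incomplete" rfl
        simp [pvFTs] at hft
        subst hft
        simp only [classify_bundle_failure_alt, pvFTs, pvSt]
        rw [List.find?_cons_of_neg (p := fun ft => conds.any fun c => PySem.Str.startswith c ft) (ne_true_of_eq_false e0), List.find?_cons_of_neg (p := fun ft => conds.any fun c => PySem.Str.startswith c ft) (ne_true_of_eq_false e1),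
          List.find?_cons_of_neg (p := fun ft => conds.any fun c => PySem.Str.startswith c ft) (ne_true_of_eq_false e2), List.find?_cons_of_neg (p := fun ft => conds.any fun c => PySem.Str.startswith c ft) (ne_true_of_eq_false e3),
          List.find?_cons_of_pos (p := fun ft => conds.any fun c => PySem.Str.startswith c ft) htrue]
  · -- M = 5 : nothing matches, both sides are none
    have h5' : M = 5 := le_antisymm hle5 h5
    simp only [classify_bundle_failure_alt, pvFTs, List.find?, h5', pvSt]
    rw [hnone 0 (by omega) "manifest_invalid" rfl, hnone 1 (by omega) "missing_required_input" rfl,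
      hnone 2 (by omega) "output_contract_invalid" rfl,
      hnone 3 (by omega) "provenance_incomplete" rfl,
      hnone 4 (by omega) "idempotency_undefined" rfl]

-- ===== VERDICT (by name: the statement is the Claim_ definition above) =====
theorem classify_bundle_failure_spec : Claim_equal_classify_bundle_failure := by
  intro conds _
  show classify_bundle_failure conds = classify_bundle_failure_alt conds
  have h : ((none : Option String), (999 : Int)) = pvSt 5 := rfl
  rw [classify_bundle_failure, h, pvFold_eq, pvMain]
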